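-- pv_equiv track=rewrite | github.com/StefanRoman1/Python | Lab2/Lab2.py | exercise9
-- ===== SOURCE A (Python) =====
-- def exercise9(matrix) :
--     list = []
--     for i in range(0, len(matrix[1])) :
--         max = 0
--         for j in range(0, len(matrix)) :
--             if matrix[j][i] < max :
--                 list.append((j,i))
--             else :
--                 max = matrix[j][i]
--     return list
-- ===== SOURCE B (Python) =====
-- def exercise9(matrix):
--     hits = []
--     ncols = len(matrix[1])
--     for i in range(ncols):
--         col = [row[i] for row in matrix]
--         # prefix[j] = max(0, col[0], ..., col[j-1])
--         prefix = [0]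
--         m = 0
--         for v in col:
--             m = max(m, v)
--             prefix.append(m)
--         for j in range(len(col)):
--             if col[j] < prefix[j]:
--                 hits.append((j, i))
--     return hits
-- ===== Notes on version B (the rewrite author's own statement) =====
-- stated objective: alternative
-- what changed: Replaces A's interleaved maintain-the-max-and-compare inner loop by two separate passes per column: first materialize the column and its prefix-maximum table (floored at 0), then a distinct comparison pass collecting (j,i) where the cell is below the prefix maximum.
import Mathlib
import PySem

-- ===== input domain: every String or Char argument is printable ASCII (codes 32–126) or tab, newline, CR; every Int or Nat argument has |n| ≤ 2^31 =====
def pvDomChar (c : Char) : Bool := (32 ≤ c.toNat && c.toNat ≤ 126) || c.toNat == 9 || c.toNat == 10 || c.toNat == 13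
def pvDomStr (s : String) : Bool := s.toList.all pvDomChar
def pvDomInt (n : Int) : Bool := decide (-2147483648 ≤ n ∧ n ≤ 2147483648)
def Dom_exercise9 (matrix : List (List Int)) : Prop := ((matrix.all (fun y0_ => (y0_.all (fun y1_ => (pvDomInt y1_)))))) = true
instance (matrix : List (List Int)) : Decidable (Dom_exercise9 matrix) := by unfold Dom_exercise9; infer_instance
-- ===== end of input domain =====

-- B splits A's interleaved maintain-the-max-and-compare column loop into two passes
-- (build the prefix-maximum table, then compare); same cost, alternative decomposition.

-- ===== PORT A =====
-- Indexing uses pyGetD with default values; Pre_exercise9 guarantees every access is in range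
-- (outside Pre_ the Python raises IndexError).
def exercise9 (matrix : List (List Int)) : List (Int × Int) :=
  let ncols : Int := ((PySem.List.pyGet? matrix 1).getD []).length
  (PySem.List.pyRange 0 ncols 1).foldl
    (fun lst i =>
      ((PySem.List.pyRange 0 (matrix.length : Int) 1).foldl
        (fun (st : List (Int × Int) × Int) j =>
          let v := PySem.List.pyGetD (PySem.List.pyGetD matrix j []) i 0
          if v < st.2 then (st.1 ++ [(j, i)], st.2) else (st.1, v))
        (lst, 0)).1)
    []

-- ===== PORT B =====
def exercise9_alt (matrix : List (List Int)) : List (Int × Int) :=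
  let ncols := ((PySem.List.pyGet? matrix 1).getD []).length
  (List.range ncols).foldl
    (fun hits (i : Nat) =>
      let col := matrix.map (fun row => PySem.List.pyGetD row (i : Int) 0)
      let pref := (col.foldl
        (fun (st : List Int × Int) v => let m := max st.2 v; (st.1 ++ [m], m))
        ([0], 0)).1
      hits ++ (List.range col.length).filterMap
        (fun j => if col.getD j 0 < pref.getD j 0 then some ((j : Int), (i : Int)) else none))
    []

-- ===== PRECONDITION & SPEC =====
-- Pre_: the Python A raises IndexError when matrix has fewer than 2 rows (matrix[1]) or some
-- row is shorter than len(matrix[1]); exactly those inputs are excluded.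
def Pre_exercise9 (matrix : List (List Int)) : Prop :=
  2 ≤ matrix.length ∧ ∀ row ∈ matrix, (matrix.getD 1 []).length ≤ row.length
instance (matrix : List (List Int)) : Decidable (Pre_exercise9 matrix) := by
  unfold Pre_exercise9; infer_instance
def pvWitness_exercise9 : List (List Int) := [[3, 1], [1, 2], [0, 5]]
def Spec_exercise9 (matrix : List (List Int)) (out : List (Int × Int)) : Prop := out = exercise9_alt matrix
instance (matrix : List (List Int)) (out : List (Int × Int)) : Decidable (Spec_exercise9 matrix out) := by unfold Spec_exercise9; infer_instance

-- ===== CLAIM (what is proved, stated in full; the proofs are below) =====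
def Claim_equal_exercise9 : Prop := ∀ (matrix : List (List Int)), Dom_exercise9 matrix → Pre_exercise9 matrix → Spec_exercise9 matrix (exercise9 matrix)

-- ===== LEMMAS AND PROOFS =====

-- common recursive characterisation of one column's hit list: running max m, position labels f
def hitsF : List (List Int) → Int → (Nat → Int × Int) → Int → List (Int × Int)
  | [], _, _, _ => []
  | r :: rs, i, f, m =>
    let v := PySem.List.pyGetD r i 0
    (if v < m then [f 0] else []) ++ hitsF rs i (fun k => f (k + 1)) (max m v)

lemma hitsF_congr (rows : List (List Int)) (i : Int) (f g : Nat → Int × Int) (m : Int)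
    (h : ∀ k, f k = g k) : hitsF rows i f m = hitsF rows i g m := by
  induction rows generalizing f g m with
  | nil => rfl
  | cons r rs ih =>
      simp only [hitsF, h 0]
      rw [ih (fun k => f (k + 1)) (fun k => g (k + 1)) _ (fun k => h (k + 1))]

-- A's inner loop (as a fold over enumerate) produces acc ++ hitsF
lemma innerA (i : Int) (rows : List (List Int)) :
    ∀ (s : Int) (acc : List (Int × Int)) (m : Int),
    ((PySem.List.enumerate rows s).foldl
      (fun (st : List (Int × Int) × Int) (p : Int × List Int) =>
        let v := PySem.List.pyGetD p.2 i 0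
        if v < st.2 then (st.1 ++ [(p.1, i)], st.2) else (st.1, v))
      (acc, m)).1
    = acc ++ hitsF rows i (fun k => (s + (k : Int), i)) m := by
  induction rows with
  | nil => intro s acc m; simp [PySem.List.enumerate_nil, hitsF]
  | cons r rs ih =>
      intro s acc m
      rw [PySem.List.enumerate_cons]
      simp only [List.foldl_cons, hitsF]
      by_cases hv : PySem.List.pyGetD r i 0 < m
      · rw [if_pos hv, if_pos hv]
        rw [ih (s + 1) (acc ++ [(s, i)]) m]
        rw [hitsF_congr rs i (fun k => (s + 1 + (k : Int), i)) (fun k => (s + ((k : Int) + 1), i))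
            _ (fun k => by simp; ring)]
        have hm : max m (PySem.List.pyGetD r i 0) = m := by omega
        simp [hm]
      · rw [if_neg hv, if_neg hv]
        rw [ih (s + 1) acc (PySem.List.pyGetD r i 0)]
        rw [hitsF_congr rs i (fun k => (s + 1 + (k : Int), i)) (fun k => (s + ((k : Int) + 1), i))
            _ (fun k => by simp; ring)]
        have hm : max m (PySem.List.pyGetD r i 0) = PySem.List.pyGetD r i 0 := by omega
        simp [hm]

-- B's prefix-building fold is a scanl of max
lemma prefFold (col : List Int) : ∀ (acc : List Int) (m : Int),
    (col.foldl (fun (st : List Int × Int) v => let m := max st.2 v; (st.1 ++ [m], m)) (acc, m)).1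
    = acc ++ (col.scanl max m).tail := by
  induction col with
  | nil => intro acc m; simp [List.scanl_nil]
  | cons v vs ih =>
      intro acc m
      simp only [List.foldl_cons, List.scanl_cons]
      rw [ih (acc ++ [max m v]) (max m v)]
      cases vs <;> simp [List.scanl_nil, List.scanl_cons]

-- B's comparison pass against a scanl-of-max table equals hitsF
lemma innerB (i : Int) (rows : List (List Int)) :
    ∀ (m : Int) (f : Nat → Int × Int),
    (List.range (rows.map (fun row => PySem.List.pyGetD row i 0)).length).filterMap
      (fun j => if (rows.map (fun row => PySem.List.pyGetD row i 0)).getD j 0 <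
                   ((rows.map (fun row => PySem.List.pyGetD row i 0)).scanl max m).getD j 0
                then some (f j) else none)
    = hitsF rows i f m := by
  induction rows with
  | nil => intro m f; simp [hitsF]
  | cons r rs ih =>
      intro m f
      simp only [List.map_cons, List.length_cons, List.range_succ_eq_map, List.filterMap_cons,
        List.scanl_cons, List.getD_cons_zero, List.filterMap_map]
      by_cases hv : PySem.List.pyGetD r i 0 < m
      · rw [if_pos hv]
        simp only [hitsF, if_pos hv,
          ← ih (max m (PySem.List.pyGetD r i 0)) (fun k => f (k + 1))]
        simp [Function.comp]
      · rw [if_neg hv]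
        simp only [hitsF, if_neg hv,
          ← ih (max m (PySem.List.pyGetD r i 0)) (fun k => f (k + 1))]
        simp [Function.comp]

-- ===== VERDICT (by name: the statement is the Claim_ definition above) =====
theorem exercise9_spec : Claim_equal_exercise9 := by
  intro matrix _ _
  show exercise9 matrix = exercise9_alt matrix
  simp only [exercise9, exercise9_alt]
  rw [PySem.List.pyRange_zero_natCast (((PySem.List.pyGet? matrix 1).getD []).length),
    List.foldl_map]
  apply PySem.List.foldl_congr_mem
  intro lst i _
  -- rewrite A's inner pyRange fold as a fold over enumerate
  have hEnum := PySem.List.enumerate_eq_map_pyRange matrix ([] : List Int)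
  have hA : ((PySem.List.pyRange 0 (matrix.length : Int) 1).foldl
      (fun (st : List (Int × Int) × Int) j =>
        let v := PySem.List.pyGetD (PySem.List.pyGetD matrix j []) (i : Int) 0
        if v < st.2 then (st.1 ++ [(j, (i : Int))], st.2) else (st.1, v))
      (lst, 0))
    = ((PySem.List.enumerate matrix 0).foldl
      (fun (st : List (Int × Int) × Int) (p : Int × List Int) =>
        let v := PySem.List.pyGetD p.2 (i : Int) 0
        if v < st.2 then (st.1 ++ [(p.1, (i : Int))], st.2) else (st.1, v))
      (lst, 0)) := by
    rw [hEnum, List.foldl_map]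
    simp [PySem.List.len]
  rw [hA, innerA (i : Int) matrix 0 lst 0]
  rw [prefFold]
  have hhead : ([0] : List Int) ++ (((matrix.map (fun row => PySem.List.pyGetD row (i : Int) 0)).scanl max 0).tail)
      = (matrix.map (fun row => PySem.List.pyGetD row (i : Int) 0)).scanl max 0 := by
    cases matrix <;> simp [List.scanl]
  rw [hhead, innerB (i : Int) matrix 0 (fun j => ((j : Int), (i : Int)))]
  congr 1
  exact hitsF_congr matrix (i : Int) _ _ 0 (fun k => by simp)
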